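-- pv_equiv track=rewrite | github.com/abzu-ai/arc_dsl | arc_dsl/bitmap.py | encode_bitstring
-- ===== SOURCE A (Python) =====
-- def encode_bitstring(bitstring) -> list[int]:
--     bits_per_chunk = 4  # Using 4 bits per integer (values 0-15)
--     # Pad the bitstring with zeros to make its length a multiple of bits_per_chunk
--     padding_length = (-len(bitstring)) % bits_per_chunk
--     bitstring += "0" * padding_length
--     encoded = []
--     for i in range(0, len(bitstring), bits_per_chunk):
--         chunk = bitstring[i : i + bits_per_chunk]
--         num = int(chunk, 2)
--         encoded.append(num)
--     return encoded
-- ===== SOURCE B (Python) =====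
-- def encode_bitstring(bitstring) -> list[int]:
--     # Single whole-string parse + mod/div nibble extraction, instead of per-chunk slicing and re-parsing.
--     padded = bitstring + "0" * ((-len(bitstring)) % 4)
--     big = int(padded, 2) if padded else 0
--     out = []
--     for _ in range(len(padded) // 4):
--         out.append(big % 16)
--         big //= 16
--     out.reverse()
--     return out
-- ===== Notes on version B (the rewrite author's own statement) =====
-- stated objective: alternative
-- what changed: B parses the zero-padded bitstring once with int(padded, 2) and extracts the 4-bit values arithmetically (big % 16, big //= 16, built back-to-front), instead of slicing the string into 4-character chunks and calling int(chunk, 2) on each.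
-- outside the precondition, e.g. on encode_bitstring('1111 111'): A returns [15, 7], B raises ValueError; on encode_bitstring('0b1'): A returns [2], B returns [2]
import Mathlib
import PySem

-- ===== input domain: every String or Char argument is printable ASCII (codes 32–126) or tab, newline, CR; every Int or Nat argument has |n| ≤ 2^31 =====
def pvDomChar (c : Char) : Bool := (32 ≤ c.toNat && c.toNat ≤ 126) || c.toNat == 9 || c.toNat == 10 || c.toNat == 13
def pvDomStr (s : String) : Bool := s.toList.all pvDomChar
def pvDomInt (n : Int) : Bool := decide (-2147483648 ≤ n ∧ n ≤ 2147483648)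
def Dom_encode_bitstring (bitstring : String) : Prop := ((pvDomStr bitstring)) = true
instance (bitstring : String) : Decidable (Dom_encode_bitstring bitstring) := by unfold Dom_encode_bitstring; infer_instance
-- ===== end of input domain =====

-- B parses the padded bitstring once and extracts 4-bit values by mod/div (built back-to-front),
-- instead of A's per-chunk string slicing and re-parsing; alternative decomposition, same cost.


-- int(chunk, 2) ported by hand: exact for nonempty strings of '0'/'1' characters,
-- which is all Pre_encode_bitstring admits (elsewhere Python raises ValueError or
-- accepts extra int-literal syntax such as whitespace/'_'/'0b').
def pyIntBase2 (cs : List Char) : Int :=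
  cs.foldl (fun a c => 2 * a + (if c = '1' then 1 else 0)) 0

-- ===== PORT A =====
def encode_bitstring (bitstring : String) : List Int :=
  let bits_per_chunk : Int := 4
  let padding_length : Int := PySem.Int.mod (-(bitstring.toList.length : Int)) bits_per_chunk
  let bs : List Char := bitstring.toList ++ PySem.List.pyRepeat ['0'] padding_length
  (PySem.List.pyRange 0 (bs.length : Int) bits_per_chunk).foldl
    (fun (encoded : List Int) (i : Int) =>
      let chunk := PySem.List.slice bs (some i) (some (i + bits_per_chunk))
      let num := pyIntBase2 chunk
      encoded ++ [num]) []

-- ===== PORT B =====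
def encode_bitstring_alt (bitstring : String) : List Int :=
  let padded : List Char :=
    bitstring.toList ++ PySem.List.pyRepeat ['0'] (PySem.Int.mod (-(bitstring.toList.length : Int)) 4)
  let big : Int := if padded ≠ [] then pyIntBase2 padded else 0
  let st : Int × List Int :=
    (PySem.List.pyRange 0 (PySem.Int.floordiv (padded.length : Int) 4) 1).foldl
      (fun (st : Int × List Int) (_ : Int) =>
        (PySem.Int.floordiv st.1 16, st.2 ++ [PySem.Int.mod st.1 16])) (big, [])
  st.2.reverse

-- ===== PRECONDITION & SPEC =====
-- Pre_ admits '0'/'1' strings with optional leading whitespace confined to the first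
-- 4-character chunk (there int() strips it and it acts like leading zeros); on other
-- inputs A usually raises ValueError, and where per-chunk int() still accepts Python
-- int-literal syntax by accident of the chunking ('_', '0b', a sign, interior spaces),
-- B's single whole-string parse may raise, so those inputs are excluded as well.
def Pre_encode_bitstring (bitstring : String) : Prop :=
  ∃ k : Nat, k < 4 ∧ k ≤ bitstring.toList.length ∧
    ((bitstring.toList.take k).all (fun c => c == ' ' || c == '\t' || c == '\n' || c == '\r')) = true ∧
    ((bitstring.toList.drop k).all (fun c => c == '0' || c == '1')) = true
instance (bitstring : String) : Decidable (Pre_encode_bitstring bitstring) := by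
  unfold Pre_encode_bitstring; infer_instance

def pvWitness_encode_bitstring : String := "10"

def Spec_encode_bitstring (bitstring : String) (out : List Int) : Prop := out = encode_bitstring_alt bitstring
instance (bitstring : String) (out : List Int) : Decidable (Spec_encode_bitstring bitstring out) := by unfold Spec_encode_bitstring; infer_instance

-- ===== CLAIM (what is proved, stated in full; the proofs are below) =====
def Claim_equal_encode_bitstring : Prop := ∀ (bitstring : String), Dom_encode_bitstring bitstring → Pre_encode_bitstring bitstring → Spec_encode_bitstring bitstring (encode_bitstring bitstring)

-- ===== LEMMAS AND PROOFS =====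

-- the value parsed with an arbitrary accumulator
theorem pyIntBase2_from (cs : List Char) (a : Int) :
    cs.foldl (fun a c => 2 * a + (if c = '1' then 1 else 0)) a
      = a * 2 ^ cs.length + pyIntBase2 cs := by
  induction cs generalizing a with
  | nil => simp [pyIntBase2]
  | cons c cs ih =>
    have h2 : pyIntBase2 (c :: cs)
        = (2 * 0 + (if c = '1' then (1:Int) else 0)) * 2 ^ cs.length + pyIntBase2 cs := by
      have hdef : pyIntBase2 (c :: cs)
          = cs.foldl (fun a c => 2 * a + (if c = '1' then 1 else 0))
              (2 * 0 + (if c = '1' then (1:Int) else 0)) := rfl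
      rw [hdef, ih]
    rw [List.foldl_cons, ih, h2, List.length_cons]
    ring

theorem pyIntBase2_cons (c : Char) (cs : List Char) :
    pyIntBase2 (c :: cs)
      = (if c = '1' then (1:Int) else 0) * 2 ^ cs.length + pyIntBase2 cs := by
  have hdef : pyIntBase2 (c :: cs)
      = cs.foldl (fun a c => 2 * a + (if c = '1' then 1 else 0))
          (2 * 0 + (if c = '1' then (1:Int) else 0)) := rfl
  rw [hdef, pyIntBase2_from]
  ring

theorem pyIntBase2_append (xs ys : List Char) :
    pyIntBase2 (xs ++ ys) = pyIntBase2 xs * 2 ^ ys.length + pyIntBase2 ys := by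
  unfold pyIntBase2
  rw [List.foldl_append, pyIntBase2_from]
  rfl

theorem pyIntBase2_nonneg (cs : List Char) : 0 ≤ pyIntBase2 cs := by
  induction cs with
  | nil => simp [pyIntBase2]
  | cons c cs ih =>
    rw [pyIntBase2_cons]
    have hp : (0:Int) < 2 ^ cs.length := by positivity
    by_cases hc : c = '1' <;> · simp [hc]; linarith

theorem pyIntBase2_lt (cs : List Char) : pyIntBase2 cs < 2 ^ cs.length := by
  induction cs with
  | nil => simp [pyIntBase2]
  | cons c cs ih =>
    rw [pyIntBase2_cons, List.length_cons, pow_succ]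
    have hp : (0:Int) < 2 ^ cs.length := by positivity
    by_cases hc : c = '1' <;> · simp [hc]; linarith

-- appending one element at a time is mapping
theorem foldl_snoc_map {α β : Type} (f : α → β) (l : List α) (acc : List β) :
    l.foldl (fun a x => a ++ [f x]) acc = acc ++ l.map f := by
  induction l generalizing acc with
  | nil => simp
  | cons x xs ih => simp [ih]

-- A's fold over range(0, 4*m, 4) as a map over chunk indices
theorem aFold_eq_map (bs : List Char) (m : Nat) (hm : bs.length = 4 * m) :
    (PySem.List.pyRange 0 (bs.length : Int) 4).foldl
      (fun (encoded : List Int) (i : Int) =>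
        encoded ++ [pyIntBase2 (PySem.List.slice bs (some i) (some (i + 4)))]) []
    = (List.range m).map (fun k => pyIntBase2 ((bs.drop (4 * k)).take 4)) := by
  have hrange : PySem.List.pyRange 0 (bs.length : Int) 4
      = (List.range m).map (fun k => ((4 * k : Nat) : Int)) := by
    rw [PySem.List.pyRange_of_pos 0 (bs.length : Int) (by norm_num)]
    rcases Nat.eq_zero_or_pos m with hm0 | hm0
    · simp [hm0, hm]
    · have hlt : (0:Int) < (bs.length : Int) := by
        have : 0 < bs.length := by omega
        exact_mod_cast this
      rw [if_pos hlt]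
      have hN : (((bs.length : Int) - 0 + 4 - 1) / 4).toNat = m := by
        rw [hm]; push_cast; omega
      rw [hN]
      apply List.map_congr_left
      intro k _
      push_cast; ring
  rw [hrange, List.foldl_map, foldl_snoc_map, List.nil_append]
  apply List.map_congr_left
  intro k hk
  rw [List.mem_range] at hk
  congr 1
  rw [PySem.List.slice_toNat bs (by positivity) (by positivity)]
  congr 1 <;> omega

-- B's loop, peeled one step at a time
def bLoop : Nat → Int → List Int → List Int
  | 0, _, o => o
  | m + 1, b, o => bLoop m (PySem.Int.floordiv b 16) (o ++ [PySem.Int.mod b 16])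

theorem bFold_eq_bLoop (l : List Int) (b : Int) (o : List Int) :
    (l.foldl (fun (st : Int × List Int) (_ : Int) =>
        (PySem.Int.floordiv st.1 16, st.2 ++ [PySem.Int.mod st.1 16])) (b, o)).2
      = bLoop l.length b o := by
  induction l generalizing b o with
  | nil => rfl
  | cons x xs ih => simpa [bLoop] using ih (PySem.Int.floordiv b 16) (o ++ [PySem.Int.mod b 16])

theorem fdiv_fmod_step (q r : Int) (_hq : 0 ≤ q) (hr0 : 0 ≤ r) (hr : r < 16) :
    PySem.Int.floordiv (q * 16 + r) 16 = q ∧ PySem.Int.mod (q * 16 + r) 16 = r := by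
  unfold PySem.Int.floordiv PySem.Int.mod
  rw [Int.fdiv_eq_ediv, Int.fmod_eq_emod]
  simp only [show ((0:Int) ≤ 16 ∨ (16:Int) ∣ q * 16 + r) = True by simp, if_true]
  omega

-- main invariant: B's mod/div loop on the whole value emits A's chunk values in reverse
theorem main_lemma (m : Nat) (bs : List Char) (hm : bs.length = 4 * m) (o : List Int) :
    bLoop m (pyIntBase2 bs) o
      = o ++ ((List.range m).map (fun k => pyIntBase2 ((bs.drop (4 * k)).take 4))).reverse := by
  induction m generalizing bs o with
  | zero => simp [bLoop]
  | succ m ih =>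
    set init := bs.take (4 * m) with hinit
    set last := bs.drop (4 * m) with hlast
    have hbs : bs = init ++ last := (List.take_append_drop _ _).symm
    have hinitlen : init.length = 4 * m := by
      simp only [hinit, List.length_take]; omega
    have hlastlen : last.length = 4 := by
      simp only [hlast, List.length_drop]; omega
    have hval : pyIntBase2 bs = pyIntBase2 init * 16 + pyIntBase2 last := by
      rw [hbs, pyIntBase2_append, hlastlen]; norm_num
    have hstep := fdiv_fmod_step (pyIntBase2 init) (pyIntBase2 last)
      (pyIntBase2_nonneg _) (pyIntBase2_nonneg _)
      (by have := pyIntBase2_lt last; rwa [hlastlen] at this)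
    have h1 : bLoop (m + 1) (pyIntBase2 bs) o
        = bLoop m (pyIntBase2 init) (o ++ [pyIntBase2 last]) := by
      simp only [bLoop, hval, hstep.1, hstep.2]
    rw [h1, ih init hinitlen _]
    have hmapcong : ∀ k ∈ List.range m,
        pyIntBase2 ((bs.drop (4 * k)).take 4) = pyIntBase2 ((init.drop (4 * k)).take 4) := by
      intro k hk
      rw [List.mem_range] at hk
      congr 1
      rw [hbs, List.drop_append_of_le_length (by omega),
          List.take_append_of_le_length (by simp only [List.length_drop, hinitlen]; omega)]
    have hlastval : (bs.drop (4 * m)).take 4 = last := by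
      rw [← hlast, List.take_of_length_le (by omega)]
    rw [List.range_succ, List.map_append, List.map_singleton, hlastval,
        List.map_congr_left hmapcong, List.reverse_append]
    simp

-- the padding makes the length a multiple of 4
theorem padded_length (cs : List Char) :
    ∃ m : Nat, (cs ++ PySem.List.pyRepeat ['0'] (PySem.Int.mod (-(cs.length : Int)) 4)).length
      = 4 * m := by
  rw [PySem.List.pyRepeat_singleton, List.length_append, List.length_replicate]
  have hmod : PySem.Int.mod (-(cs.length : Int)) 4 = (-(cs.length : Int)) % 4 := by
    unfold PySem.Int.mod
    rw [Int.fmod_eq_emod]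
    simp
  rw [hmod]
  refine ⟨(cs.length + 3) / 4, ?_⟩
  omega

-- ===== VERDICT (by name: the statement is the Claim_ definition above) =====
theorem encode_bitstring_spec : Claim_equal_encode_bitstring := by
  intro bitstring _ _
  unfold Spec_encode_bitstring encode_bitstring encode_bitstring_alt
  simp only []
  set cs := bitstring.toList with hcs
  set bs := cs ++ PySem.List.pyRepeat ['0'] (PySem.Int.mod (-(cs.length : Int)) 4) with hbs
  obtain ⟨m, hm⟩ := padded_length cs
  rw [← hbs] at hm
  -- B's parsed value is pyIntBase2 bs in both branches of the guard
  have hbig : (if bs ≠ [] then pyIntBase2 bs else 0) = pyIntBase2 bs := by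
    by_cases h : bs = [] <;> simp [h, pyIntBase2]
  -- B's loop count is m
  have hdiv : PySem.Int.floordiv ((bs.length : Nat) : Int) 4 = (m : Int) := by
    unfold PySem.Int.floordiv
    rw [Int.fdiv_eq_ediv]
    simp only [show ((0:Int) ≤ 4 ∨ (4:Int) ∣ (bs.length : Int)) = True by simp, if_true]
    omega
  have hlen : (PySem.List.pyRange 0 (m : Int) 1).length = m := by
    rw [PySem.List.length_pyRange_one]; omega
  rw [hbig, hdiv, bFold_eq_bLoop, hlen, main_lemma m bs hm [],
      List.nil_append, List.reverse_reverse, aFold_eq_map bs m hm]
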